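-- pv_equiv track=rewrite | github.com/karnkittik/AlgorithmDesign | Q2/SCC.py | dfs_scc2
-- ===== SOURCE A (Python) =====
-- def dfs_scc2(G, v_order):
--     visited = [False]*len(G)
--     scc = []
--     for u in v_order:
--         if not visited[u] :
--             scc.append( [u] )
--             dfs_scc2R(G, u, visited, scc[-1])
--     return scc
--
-- def dfs_scc2R(G, u, visited, component):
--     visited[u] = True
--     for v in G[u]:
--         if not visited[v]:
--             component.append(v)
--             dfs_scc2R(G, v, visited, component)
-- ===== SOURCE B (Python) =====
-- def dfs_scc2(G, v_order):
--     visited = [False] * len(G)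
--     scc = []
--     for s in v_order:
--         if not visited[s]:
--             comp = []
--             stack = [s]
--             while stack:
--                 x = stack.pop()
--                 if visited[x]:
--                     continue
--                 visited[x] = True
--                 comp.append(x)
--                 for v in reversed(G[x]):
--                     if not visited[v]:
--                         stack.append(v)
--             scc.append(comp)
--     return scc
-- ===== Notes on version B (the rewrite author's own statement) =====
-- stated objective: alternative
-- what changed: The recursive DFS helper dfs_scc2R is replaced by an iterative DFS with an explicit stack (mark visited at pop, push neighbours of G[x] in reverse, skip already-visited pops), which reproduces A's exact preorder component lists without recursion.
-- outside the precondition, e.g. on dfs_scc2([[0], [5]], [0]): A returns [[0]], B returns [[0]]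
import Mathlib
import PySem

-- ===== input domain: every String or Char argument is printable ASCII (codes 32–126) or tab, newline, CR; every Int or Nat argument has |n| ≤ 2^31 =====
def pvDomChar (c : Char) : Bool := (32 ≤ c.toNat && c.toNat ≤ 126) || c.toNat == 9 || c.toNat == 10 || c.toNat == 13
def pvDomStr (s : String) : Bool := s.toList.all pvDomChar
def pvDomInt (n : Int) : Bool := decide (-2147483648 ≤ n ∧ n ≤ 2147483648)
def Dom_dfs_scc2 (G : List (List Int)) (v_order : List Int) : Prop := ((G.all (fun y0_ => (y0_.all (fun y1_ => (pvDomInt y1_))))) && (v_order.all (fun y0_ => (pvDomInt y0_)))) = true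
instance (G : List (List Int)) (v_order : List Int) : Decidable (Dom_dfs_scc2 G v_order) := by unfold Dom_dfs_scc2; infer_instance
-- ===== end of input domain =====

-- B replaces A's recursive DFS helper by an iterative explicit-stack DFS (mark on pop,
-- push neighbours in reverse), an alternative of the same cost that cannot overflow the
-- recursion stack. Equivalence of the RETURN value is proved; A also mutates nothing the
-- caller passed (visited/scc are local), so there is no observable side-effect gap.

-- ===== PORT A =====
-- literal port of dfs_scc2R: Python mutation of (visited, component) becomes state threading;
-- the fuel argument is a totality guard only — it never runs out under Pre_ (proved below).
mutual
def dfsAR (f : Nat) (G : List (List Int)) (u : Int) (vis : List Bool) (comp : List Int) :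
    List Bool × List Int :=
  match f with
  | 0 => (vis, comp)
  | f + 1 => dfsAGo f G (PySem.List.pyGetD G u []) (PySem.List.pySetD vis u true) comp
termination_by (f, 0)

-- the 'for v in G[u]' loop of dfs_scc2R
def dfsAGo (f : Nat) (G : List (List Int)) (l : List Int) (vis : List Bool) (comp : List Int) :
    List Bool × List Int :=
  match l with
  | [] => (vis, comp)
  | v :: vs =>
    if PySem.List.pyGetD vis v false then dfsAGo f G vs vis comp
    else
      let r := dfsAR f G v vis (comp ++ [v])
      dfsAGo f G vs r.1 r.2
termination_by (f, l.length + 1)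
end

def dfs_scc2 (G : List (List Int)) (v_order : List Int) : List (List Int) :=
  (v_order.foldl
    (fun (st : List Bool × List (List Int)) u =>
      if PySem.List.pyGetD st.1 u false then st
      else
        let r := dfsAR (G.length + 1) G u st.1 [u]
        (r.1, st.2 ++ [r.2]))
    (List.replicate G.length false, [])).2

-- ===== PORT B =====
-- the 'while stack:' loop of Source B; stack top is the list head, the inner
-- 'for v in reversed(G[x])' push loop is the foldl over (G[x]).reverse.
-- fuel is a totality guard only — it never runs out under Pre_ (proved below).
def loopB (f : Nat) (G : List (List Int)) (stack : List Int) (vis : List Bool)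
    (comp : List Int) : List Bool × List Int :=
  match f, stack with
  | 0, _ => (vis, comp)
  | _ + 1, [] => (vis, comp)
  | f + 1, x :: st =>
    if PySem.List.pyGetD vis x false then loopB f G st vis comp
    else
      let vis' := PySem.List.pySetD vis x true
      loopB f G
        ((PySem.List.pyGetD G x []).reverse.foldl
          (fun s v => if PySem.List.pyGetD vis' v false then s else v :: s) st)
        vis' (comp ++ [x])

def dfs_scc2_alt (G : List (List Int)) (v_order : List Int) : List (List Int) :=
  (v_order.foldl
    (fun (st : List Bool × List (List Int)) s =>
      if PySem.List.pyGetD st.1 s false then st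
      else
        let r := loopB (G.length * ((G.map List.length).sum + 1) + 1) G [s] st.1 []
        (r.1, st.2 ++ [r.2]))
    (List.replicate G.length false, [])).2

-- ===== PRECONDITION & SPEC =====
-- Pre_ requires every vertex index listed (in v_order and in every adjacency row) to be a
-- valid Python index into G; outside it A raises IndexError on the first bad index it
-- dereferences.  This is slightly narrower than A's exact domain: a bad index sitting only
-- in a row DFS never visits is never dereferenced, A returns there, and B returns the same
-- value (both programs read exactly the same rows).
def Pre_dfs_scc2 (G : List (List Int)) (v_order : List Int) : Prop :=
  (∀ u ∈ v_order, PySem.Raise.InRange G.length u) ∧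
  (∀ row ∈ G, ∀ v ∈ row, PySem.Raise.InRange G.length v)
instance (G : List (List Int)) (v_order : List Int) : Decidable (Pre_dfs_scc2 G v_order) := by
  unfold Pre_dfs_scc2; infer_instance

def pvWitness_dfs_scc2 : List (List Int) × List Int := ([[1], [0], [-1]], [2, 0, 1])

def Spec_dfs_scc2 (G : List (List Int)) (v_order : List Int) (out : List (List Int)) : Prop := out = dfs_scc2_alt G v_order
instance (G : List (List Int)) (v_order : List Int) (out : List (List Int)) : Decidable (Spec_dfs_scc2 G v_order out) := by unfold Spec_dfs_scc2; infer_instance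

-- ===== CLAIM (what is proved, stated in full; the proofs are below) =====
def Claim_equal_dfs_scc2 : Prop := ∀ (G : List (List Int)) (v_order : List Int), Dom_dfs_scc2 G v_order → Pre_dfs_scc2 G v_order → Spec_dfs_scc2 G v_order (dfs_scc2 G v_order)

-- ===== LEMMAS AND PROOFS =====

def pvMu (vis : List Bool) : Nat := vis.count false

def pvMono (a b : List Bool) : Prop :=
  a.length = b.length ∧
    ∀ i : Int, PySem.List.pyGetD a i false = true → PySem.List.pyGetD b i false = true

lemma pvIdx_some (n : Nat) (i : Int) (h : PySem.Raise.InRange n i) :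
    ∃ k, PySem.List.pyIdx? n i = some k ∧ k < n := by
  simp [PySem.List.pyIdx?, PySem.Raise.InRange] at *
  split_ifs with h1 h2 h3 <;> simp <;> omega

lemma pvGetD_idx (vis : List Bool) (i : Int) (k : Nat)
    (h : PySem.List.pyIdx? vis.length i = some k) :
    PySem.List.pyGetD vis i false = vis.getD k false := by
  simp [PySem.List.pyGetD, PySem.List.pyGet?, h, List.getD_eq_getElem?_getD]

lemma pvSetD_idx (vis : List Bool) (i : Int) (v : Bool) (k : Nat)
    (h : PySem.List.pyIdx? vis.length i = some k) :
    PySem.List.pySetD vis i v = vis.set k v := by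
  simp [PySem.List.pySetD, PySem.List.pySet?, h]

lemma pvMono_refl (a : List Bool) : pvMono a a := ⟨rfl, fun _ h => h⟩

lemma pvMono_trans {a b c : List Bool} (h1 : pvMono a b) (h2 : pvMono b c) : pvMono a c :=
  ⟨h1.1.trans h2.1, fun i h => h2.2 i (h1.2 i h)⟩

lemma pvMono_set (vis : List Bool) (x : Int) : pvMono vis (PySem.List.pySetD vis x true) := by
  refine ⟨(PySem.List.length_pySetD vis x true).symm, fun i h => ?_⟩
  by_cases hx : PySem.Raise.InRange vis.length x
  · obtain ⟨k, hk, hklt⟩ := pvIdx_some _ _ hx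
    rw [pvSetD_idx vis x true k hk]
    rcases hi : PySem.List.pyIdx? vis.length i with _ | k'
    · simp [PySem.List.pyGetD, PySem.List.pyGet?, hi] at h
    · have h' := pvGetD_idx vis i k' hi
      have hlen : (vis.set k true).length = vis.length := by simp
      have hi2 : PySem.List.pyIdx? (vis.set k true).length i = some k' := by rw [hlen]; exact hi
      rw [pvGetD_idx _ i k' hi2]
      rw [h'] at h
      rw [List.getD_eq_getElem?_getD] at h ⊢
      rw [List.getElem?_set]
      by_cases hkk : k = k'
      · subst hkk; simp [hklt]
      · simp only [if_neg hkk]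
        exact h
  · have : PySem.List.pySetD vis x true = vis := by
      have := PySem.List.pySet?_eq_none_iff (xs := vis) (i := x) (v := true)
      simp [PySem.List.pySetD]
      rcases hs : PySem.List.pySet? vis x true with _ | w
      · simp
      · exfalso; exact hx (by by_contra hc; rw [this.2 hc] at hs; simp at hs)
    rw [this]; exact h

lemma pvCount_set_true (xs : List Bool) (k : Nat) :
    ∀ (hk : k < xs.length), xs[k] = false →
      (xs.set k true).count false + 1 = xs.count false := by
  induction xs generalizing k with
  | nil => intro hk; simp at hk
  | cons a l ih =>
    intro hk ha
    cases k with
    | zero => simp at ha; simp [ha]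
    | succ k' =>
      simp at ha hk
      have := ih k' hk ha
      simp [List.count_cons]
      omega

lemma pvMuDec (vis : List Bool) (x : Int) (h : PySem.Raise.InRange vis.length x)
    (hu : PySem.List.pyGetD vis x false = false) :
    pvMu (PySem.List.pySetD vis x true) + 1 = pvMu vis := by
  obtain ⟨k, hk, hklt⟩ := pvIdx_some _ _ h
  rw [pvSetD_idx vis x true k hk] at *
  have hx : vis[k] = false := by
    rw [pvGetD_idx vis x k hk, List.getD_eq_getElem?_getD] at hu
    simpa [List.getElem?_eq_getElem hklt] using hu
  exact pvCount_set_true vis k hklt hx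

lemma pvMono_count {a b : List Bool} (h : pvMono a b) : pvMu b ≤ pvMu a := by
  obtain ⟨hlen, hpt⟩ := h
  have hpt' : ∀ k : Nat, k < a.length → a.getD k false = true → b.getD k false = true := by
    intro k hk hval
    have := hpt (k : Int)
    simpa using this (by simpa using hval)
  clear hpt
  unfold pvMu
  induction a generalizing b with
  | nil => cases b <;> simp_all
  | cons x l ih =>
    cases b with
    | nil => simp at hlen
    | cons y m =>
      simp at hlen
      have h0 := hpt' 0 (by simp)
      have htail : ∀ k, k < l.length → l.getD k false = true → m.getD k false = true := by
        intro k hk hv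
        have := hpt' (k+1) (by simp; omega)
        simpa using this (by simpa using hv)
      have hle := ih hlen htail
      have h0' : x = true → y = true := by
        intro hx; simpa [hx] using h0
      cases x <;> cases y <;> simp <;> try omega
      · exact absurd (h0' rfl) (by simp)
def pvS (G : List (List Int)) : Nat := (G.map List.length).sum

def pvBeta (G : List (List Int)) (vis : List Bool) (st : List Int) : Nat :=
  st.length + pvMu vis * (pvS G + 1)

lemma loopB_nil (f : Nat) (G : List (List Int)) (vis : List Bool) (comp : List Int) :
    loopB f G [] vis comp = (vis, comp) := by cases f <;> rw [loopB]

lemma pushFold (l : List Int) (st : List Int) (p : Int → Bool) :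
    l.reverse.foldl (fun s v => if p v then s else v :: s) st
      = l.filter (fun v => !p v) ++ st := by
  induction l generalizing st with
  | nil => simp
  | cons a l ih =>
    rw [List.reverse_cons, List.foldl_append, ih]
    by_cases hp : p a <;> simp [hp]

lemma pvAMono : ∀ f : Nat,
    (∀ (G : List (List Int)) (u : Int) (vis : List Bool) (comp : List Int),
      pvMono vis (dfsAR f G u vis comp).1) ∧
    (∀ (G : List (List Int)) (l : List Int) (vis : List Bool) (comp : List Int),
      pvMono vis (dfsAGo f G l vis comp).1) := by
  intro f
  induction f with
  | zero =>
    have hQ : ∀ (G : List (List Int)) (u : Int) (vis : List Bool) (comp : List Int),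
        pvMono vis (dfsAR 0 G u vis comp).1 := by
      intro G u vis comp; rw [dfsAR]; exact pvMono_refl vis
    refine ⟨hQ, ?_⟩
    intro G l
    induction l with
    | nil => intro vis comp; rw [dfsAGo]; exact pvMono_refl vis
    | cons v vs ih =>
      intro vis comp
      rw [dfsAGo]
      by_cases h : PySem.List.pyGetD vis v false
      · simp only [h, if_true]; exact ih vis comp
      · simp only [h, if_false, Bool.false_eq_true]
        exact pvMono_trans (hQ G v vis (comp ++ [v])) (ih _ _)
  | succ f ihf =>
    have hQ : ∀ (G : List (List Int)) (u : Int) (vis : List Bool) (comp : List Int),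
        pvMono vis (dfsAR (f+1) G u vis comp).1 := by
      intro G u vis comp
      rw [dfsAR]
      exact pvMono_trans (pvMono_set vis u) (ihf.2 G _ _ comp)
    refine ⟨hQ, ?_⟩
    intro G l
    induction l with
    | nil => intro vis comp; rw [dfsAGo]; exact pvMono_refl vis
    | cons v vs ih =>
      intro vis comp
      rw [dfsAGo]
      by_cases h : PySem.List.pyGetD vis v false
      · simp only [h, if_true]; exact ih vis comp
      · simp only [h, if_false, Bool.false_eq_true]
        exact pvMono_trans (hQ G v vis (comp ++ [v])) (ih _ _)

lemma pvBeta_push (G : List (List Int)) (vis : List Bool) (x : Int) (st : List Int)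
    (p : Int → Bool) (hx : PySem.Raise.InRange G.length x) (hlen : vis.length = G.length)
    (hu : PySem.List.pyGetD vis x false = false) :
    pvBeta G (PySem.List.pySetD vis x true)
        ((PySem.List.pyGetD G x []).filter p ++ st) + 2 ≤ pvBeta G vis (x :: st) := by
  have hrow : PySem.List.pyGetD G x [] ∈ G := PySem.List.pyGetD_mem G [] hx
  have hrlen : (PySem.List.pyGetD G x []).length ≤ pvS G :=
    List.le_sum_of_mem (List.mem_map_of_mem hrow)
  have hflt : ((PySem.List.pyGetD G x []).filter p).length ≤ (PySem.List.pyGetD G x []).length :=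
    List.length_filter_le _ _
  have hmu : pvMu (PySem.List.pySetD vis x true) + 1 = pvMu vis :=
    pvMuDec vis x (hlen ▸ hx) hu
  have hS : pvMu vis * (pvS G + 1)
      = pvMu (PySem.List.pySetD vis x true) * (pvS G + 1) + (pvS G + 1) := by
    rw [← hmu]; ring
  simp only [pvBeta, List.length_append, List.length_cons]
  omega

lemma pvBIrr : ∀ (b : Nat) (G : List (List Int)) (vis : List Bool) (st comp : List Int)
    (f g : Nat),
    (∀ row ∈ G, ∀ v ∈ row, PySem.Raise.InRange G.length v) →
    (∀ v ∈ st, PySem.Raise.InRange G.length v) →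
    vis.length = G.length →
    pvBeta G vis st ≤ b → b ≤ f → b ≤ g →
    loopB f G st vis comp = loopB g G st vis comp := by
  intro b
  induction b with
  | zero =>
    intro G vis st comp f g hG hst hlen hb hf hg
    have : st = [] := by
      cases st with
      | nil => rfl
      | cons x s => simp [pvBeta] at hb
    subst this
    rw [loopB_nil, loopB_nil]
  | succ b ih =>
    intro G vis st comp f g hG hst hlen hb hf hg
    cases st with
    | nil => rw [loopB_nil, loopB_nil]
    | cons x s =>
      obtain ⟨f', rfl⟩ : ∃ f', f = f' + 1 := ⟨f - 1, by omega⟩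
      obtain ⟨g', rfl⟩ : ∃ g', g = g' + 1 := ⟨g - 1, by omega⟩
      rw [loopB, loopB]
      by_cases hv : PySem.List.pyGetD vis x false
      · simp only [hv, if_true]
        exact ih G vis s comp f' g' hG (fun v hv => hst v (List.mem_cons_of_mem _ hv)) hlen
          (by simp [pvBeta] at hb ⊢; omega) (by omega) (by omega)
      · simp only [hv, if_false, Bool.false_eq_true]
        have hx : PySem.Raise.InRange G.length x := hst x List.mem_cons_self
        rw [pushFold]
        have hpush := pvBeta_push G vis x s
          (fun v => !PySem.List.pyGetD (PySem.List.pySetD vis x true) v false) hx hlen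
          (by simpa using hv)
        refine ih G _ _ _ f' g' hG ?_ ?_ (by omega) (by omega) (by omega)
        · intro v hvm
          rcases List.mem_append.mp hvm with h1 | h1
          · exact hG _ (PySem.List.pyGetD_mem G [] hx) v (List.mem_of_mem_filter h1)
          · exact hst v (List.mem_cons_of_mem _ h1)
        · rw [PySem.List.length_pySetD]; exact hlen

lemma pvBridge : ∀ (m : Nat) (G : List (List Int)),
    (∀ row ∈ G, ∀ v ∈ row, PySem.Raise.InRange G.length v) →
    ∀ (vis : List Bool), vis.length = G.length → pvMu vis = m →
    ∀ (l : List Int), ∀ (vis0 : List Bool) (st comp : List Int) (fA fB g : Nat),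
    (∀ v ∈ l, PySem.Raise.InRange G.length v) →
    (∀ v ∈ st, PySem.Raise.InRange G.length v) →
    pvMono vis0 vis →
    pvMu vis + 1 ≤ fA →
    pvBeta G vis (l.filter (fun v => !PySem.List.pyGetD vis0 v false) ++ st) ≤ fB →
    pvBeta G (dfsAGo fA G l vis comp).1 st ≤ g →
    loopB fB G (l.filter (fun v => !PySem.List.pyGetD vis0 v false) ++ st) vis comp
      = loopB g G st (dfsAGo fA G l vis comp).1 (dfsAGo fA G l vis comp).2 := by
  intro m
  induction m using Nat.strong_induction_on with
  | _ m ihm =>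
  intro G hG vis hlen hmu l
  induction l with
  | nil =>
    intro vis0 st comp fA fB g _ hst hmono hfA hfB hg
    rw [dfsAGo]
    simp only [List.filter_nil, List.nil_append] at hfB ⊢
    exact pvBIrr (pvBeta G vis st) G vis st comp fB g hG hst hlen le_rfl hfB (by rw [dfsAGo] at hg; exact hg)
  | cons v vs ihl =>
    intro vis0 st comp fA fB g hl hst hmono hfA hfB hg
    by_cases hv0 : PySem.List.pyGetD vis0 v false
    · -- v already visited when it was (not) pushed: it is dropped from the stack segment,
      -- and A skips it too (visited sets only grow)
      have hv : PySem.List.pyGetD vis v false = true := hmono.2 v hv0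
      rw [List.filter_cons_of_neg (by simp [hv0])] at hfB ⊢
      rw [dfsAGo] at hg ⊢
      simp only [hv, if_true] at hg ⊢
      exact ihl vis0 st comp fA fB g (fun w hw => hl w (List.mem_cons_of_mem _ hw)) hst hmono hfA hfB hg
    · rw [List.filter_cons_of_pos (by simp [hv0])] at hfB ⊢
      by_cases hv : PySem.List.pyGetD vis v false
      · -- v became visited since it was pushed: B pops and discards, A skips
        obtain ⟨fB', rfl⟩ : ∃ fB', fB = fB' + 1 := ⟨fB - 1, by simp [pvBeta] at hfB; omega⟩
        rw [List.cons_append, loopB]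
        simp only [hv, if_true]
        rw [dfsAGo] at hg ⊢
        simp only [hv, if_true] at hg ⊢
        exact ihl vis0 st comp fA fB' g (fun w hw => hl w (List.mem_cons_of_mem _ hw)) hst hmono hfA
          (by simp [pvBeta] at hfB ⊢; omega) hg
      · -- v unvisited: B pops and expands v, A recurses into v
        have hvin : PySem.Raise.InRange G.length v := hl v List.mem_cons_self
        rw [List.cons_append] at hfB ⊢
        obtain ⟨fA', rfl⟩ : ∃ fA', fA = fA' + 1 := ⟨fA - 1, by omega⟩
        obtain ⟨fB', rfl⟩ : ∃ fB', fB = fB' + 1 := ⟨fB - 1, by simp [pvBeta] at hfB; omega⟩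
        rw [loopB]
        simp only [hv, if_false, Bool.false_eq_true]
        rw [pushFold]
        rw [dfsAGo] at hg ⊢
        simp only [hv, if_false, Bool.false_eq_true] at hg ⊢
        rw [dfsAR] at hg ⊢
        set vis1 := PySem.List.pySetD vis v true with hvis1
        set row := PySem.List.pyGetD G v [] with hrowdef
        set R := List.filter (fun v => !PySem.List.pyGetD vis0 v false) vs ++ st with hR
        have hrowG : row ∈ G := PySem.List.pyGetD_mem G [] hvin
        have hrowIn : ∀ w ∈ row, PySem.Raise.InRange G.length w := hG row hrowG
        have hlen1 : vis1.length = G.length := by rw [hvis1, PySem.List.length_pySetD]; exact hlen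
        have hmu1 : pvMu vis1 + 1 = pvMu vis := by
          rw [hvis1]; exact pvMuDec vis v (hlen ▸ hvin) (by simpa using hv)
        have hRin : ∀ w ∈ R, PySem.Raise.InRange G.length w := by
          intro w hw
          rcases List.mem_append.mp hw with h1 | h1
          · exact hl w (List.mem_cons_of_mem _ (List.mem_of_mem_filter h1))
          · exact hst w h1
        have hpush := pvBeta_push G vis v R
          (fun w => !PySem.List.pyGetD vis1 w false) hvin hlen (by simpa using hv)
        rw [← hvis1, ← hrowdef] at hpush
        set r := dfsAGo fA' G row vis1 (comp ++ [v]) with hr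
        have hmono1 : pvMono vis1 r.1 := (pvAMono fA').2 G row vis1 (comp ++ [v])
        have hmu2 : pvMu r.1 ≤ pvMu vis1 := pvMono_count hmono1
        have hlen2 : r.1.length = G.length := by rw [← hmono1.1]; exact hlen1
        have hbR : pvBeta G r.1 R ≤ pvBeta G vis1 R := by
          simp only [pvBeta]
          have : pvMu r.1 * (pvS G + 1) ≤ pvMu vis1 * (pvS G + 1) :=
            Nat.mul_le_mul_right _ hmu2
          omega
        have h1 : pvBeta G vis1 R
            ≤ pvBeta G vis1 (row.filter (fun w => !PySem.List.pyGetD vis1 w false) ++ R) := by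
          simp only [pvBeta, List.length_append]; omega
        have hstep1 : loopB fB' G
            (row.filter (fun w => !PySem.List.pyGetD vis1 w false) ++ R) vis1 (comp ++ [v])
            = loopB fB' G R r.1 r.2 := by
          refine ihm (pvMu vis1) (by omega) G hG vis1 hlen1 rfl row vis1 R (comp ++ [v])
            fA' fB' fB' hrowIn hRin (pvMono_refl vis1) (by omega) (by omega) ?_
          rw [← hr]
          omega
        rw [hstep1]
        -- continue with the rest of the sibling list at the grown visited set
        exact ihm (pvMu r.1) (by omega) G hG r.1 hlen2 rfl vs vis0 st r.2 (fA' + 1) fB' g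
          (fun w hw => hl w (List.mem_cons_of_mem _ hw)) hst
          (pvMono_trans hmono (pvMono_trans (hvis1 ▸ pvMono_set vis v) hmono1)) (by omega)
          (by rw [← hR]; omega) hg

lemma pvCompEq (G : List (List Int)) (u : Int) (vis : List Bool)
    (hG : ∀ row ∈ G, ∀ v ∈ row, PySem.Raise.InRange G.length v)
    (hu : PySem.Raise.InRange G.length u)
    (hlen : vis.length = G.length)
    (hv : PySem.List.pyGetD vis u false = false) :
    loopB (G.length * ((G.map List.length).sum + 1) + 1) G [u] vis []
      = dfsAR (G.length + 1) G u vis [u] := by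
  have hn : 1 ≤ G.length := by
    obtain ⟨h1, h2⟩ := hu; omega
  have hmuLe : pvMu vis ≤ G.length := hlen ▸ List.count_le_length
  rw [dfsAR, loopB]
  simp only [hv, if_false, Bool.false_eq_true]
  rw [pushFold]
  set vis1 := PySem.List.pySetD vis u true with hvis1
  set row := PySem.List.pyGetD G u [] with hrowdef
  have hrowG : row ∈ G := PySem.List.pyGetD_mem G [] hu
  have hrowIn : ∀ w ∈ row, PySem.Raise.InRange G.length w := hG row hrowG
  have hrlen : row.length ≤ pvS G := List.le_sum_of_mem (List.mem_map_of_mem hrowG)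
  have hlen1 : vis1.length = G.length := by rw [hvis1, PySem.List.length_pySetD]; exact hlen
  have hmu1 : pvMu vis1 + 1 = pvMu vis := by
    rw [hvis1]; exact pvMuDec vis u (hlen ▸ hu) hv
  have hmul : (pvMu vis1 + 1) * (pvS G + 1) ≤ G.length * (pvS G + 1) :=
    Nat.mul_le_mul_right _ (by omega)
  rw [Nat.add_one_mul] at hmul
  set r := dfsAGo G.length G row vis1 [u] with hr
  have hmono1 : pvMono vis1 r.1 := (pvAMono G.length).2 G row vis1 [u]
  have hmu2 : pvMu r.1 ≤ pvMu vis1 := pvMono_count hmono1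
  have hmul2 : pvMu r.1 * (pvS G + 1) ≤ pvMu vis1 * (pvS G + 1) :=
    Nat.mul_le_mul_right _ hmu2
  have key := pvBridge (pvMu vis1) G hG vis1 hlen1 rfl row vis1 [] [u]
    G.length (G.length * ((G.map List.length).sum + 1))
    (G.length * ((G.map List.length).sum + 1) + 1)
    hrowIn (by simp) (pvMono_refl vis1) (by omega) ?_ ?_
  · rw [← hr] at key
    simp only [List.nil_append]
    rw [key, loopB_nil]
  · have hflt : (row.filter (fun w => !PySem.List.pyGetD vis1 w false)).length ≤ row.length :=
      List.length_filter_le _ _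
    show pvBeta G vis1 _ ≤ G.length * (pvS G + 1)
    simp only [pvBeta, List.length_append, List.length_nil]
    omega
  · rw [← hr]
    show pvBeta G r.1 _ ≤ G.length * (pvS G + 1) + 1
    simp only [pvBeta, List.length_nil]
    omega

lemma pvFoldEq (G : List (List Int))
    (hG : ∀ row ∈ G, ∀ v ∈ row, PySem.Raise.InRange G.length v) :
    ∀ (vo : List Int) (st : List Bool × List (List Int)),
    (∀ u ∈ vo, PySem.Raise.InRange G.length u) → st.1.length = G.length →
    vo.foldl (fun st u => if PySem.List.pyGetD st.1 u false then st
      else ((dfsAR (G.length + 1) G u st.1 [u]).1,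
            st.2 ++ [(dfsAR (G.length + 1) G u st.1 [u]).2])) st
    = vo.foldl (fun st s => if PySem.List.pyGetD st.1 s false then st
      else ((loopB (G.length * ((G.map List.length).sum + 1) + 1) G [s] st.1 []).1,
            st.2 ++ [(loopB (G.length * ((G.map List.length).sum + 1) + 1) G [s] st.1 []).2])) st := by
  intro vo
  induction vo with
  | nil => intro st _ _; rfl
  | cons u vo' ih =>
    intro st hvo hlen
    have hu : PySem.Raise.InRange G.length u := hvo u List.mem_cons_self
    simp only [List.foldl_cons]
    by_cases h : PySem.List.pyGetD st.1 u false
    · simp only [h, if_true]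
      exact ih st (fun w hw => hvo w (List.mem_cons_of_mem _ hw)) hlen
    · simp only [h, if_false, Bool.false_eq_true]
      rw [pvCompEq G u st.1 hG hu hlen (by simpa using h)]
      refine ih _ (fun w hw => hvo w (List.mem_cons_of_mem _ hw)) ?_
      have := ((pvAMono (G.length + 1)).1 G u st.1 [u]).1
      simp only [← this]
      exact hlen


theorem pvWitness_ok :
    Dom_dfs_scc2 pvWitness_dfs_scc2.1 pvWitness_dfs_scc2.2 ∧
    Pre_dfs_scc2 pvWitness_dfs_scc2.1 pvWitness_dfs_scc2.2 := by
  constructor <;> decide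

-- ===== VERDICT (by name: the statement is the Claim_ definition above) =====
theorem dfs_scc2_spec : Claim_equal_dfs_scc2 := by
  intro G vo _ hPre
  unfold Spec_dfs_scc2 dfs_scc2 dfs_scc2_alt
  refine congrArg Prod.snd ?_
  exact pvFoldEq G hPre.2 vo (List.replicate G.length false, []) hPre.1 (by simp)
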